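-- pv_equiv track=rewrite | github.com/urmaspitsi/Education | TalTech Master Studies 2019-2023/Tehisintellekt ja masinõpe - ITI0210/nqueens_greedy_sgd.py | offsets
-- ===== SOURCE A (Python) =====
-- from typing import Dict, List, Tuple
--
-- def offsets(conf:List[int]):
--   res = dict()
--   for j, (a, b) in enumerate([(i - v, i + v) for i,v in enumerate(conf)]):
--     if a in res:
--       res[a].append(j)
--     else:
--       res[a] = [j]
--
--     if b in res:
--       res[b].append(j)
--     else:
--       res[b] = [j]
--   res = {k: sorted(set(v)) for k,v in res.items()}
--   return res
-- ===== SOURCE B (Python) =====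
-- def offsets(conf):
--   # Two staged passes instead of incremental dict-of-lists grouping: pass 1
--   # fixes the key order (first occurrence of each diagonal offset in the flat
--   # offset stream), pass 2 collects, per key, the queen indices whose rising
--   # or falling diagonal hits that offset. No dict of lists is maintained;
--   # values come out sorted and deduplicated by construction.
--   stream = [o for i, v in enumerate(conf) for o in (i - v, i + v)]
--   return {k: [i for i, v in enumerate(conf) if i - v == k or i + v == k]
--           for k in dict.fromkeys(stream)}
-- ===== Notes on version B (the rewrite author's own statement) =====
-- stated objective: alternative
-- what changed: B replaces A's incremental dict-of-lists grouping (append per hit, then a sorted(set(v)) rebuild pass) with two staged passes that maintain no dict of lists: a flat offset stream fixes the key order via dict.fromkeys, then each key's index list is collected by a per-key rescan of enumerate(conf), coming out sorted and deduplicated by construction.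
import Mathlib
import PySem

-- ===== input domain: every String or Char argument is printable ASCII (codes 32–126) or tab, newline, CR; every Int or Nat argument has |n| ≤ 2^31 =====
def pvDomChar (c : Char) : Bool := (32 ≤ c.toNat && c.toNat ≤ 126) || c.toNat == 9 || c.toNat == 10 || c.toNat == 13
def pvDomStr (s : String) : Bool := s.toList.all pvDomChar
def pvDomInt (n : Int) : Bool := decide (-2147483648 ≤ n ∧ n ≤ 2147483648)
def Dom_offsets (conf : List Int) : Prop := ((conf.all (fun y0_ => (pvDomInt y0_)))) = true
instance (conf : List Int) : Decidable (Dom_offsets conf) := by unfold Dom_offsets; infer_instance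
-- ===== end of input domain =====

-- B replaces A's incremental dict-of-lists grouping with two staged passes:
-- a flat offset stream fixes the key order, then a per-key rescan of the
-- configuration collects each group (sorted and deduplicated by construction).

-- ===== PORT A =====
def offsets (conf : List Int) : List (Int × List Int) :=
  let pairs := (PySem.List.enumerate conf).map (fun iv => (iv.1 - iv.2, iv.1 + iv.2))
  let res := (PySem.List.enumerate pairs).foldl
      (fun d jab => (d.modify jab.2.1 [] (· ++ [jab.1])).modify jab.2.2 [] (· ++ [jab.1]))
      PySem.Dict.empty
  (res.items.foldl
      (fun d kv => d.insert kv.1 (PySem.List.sorted (PySem.Set.ofList kv.2) id))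
      PySem.Dict.empty).items

-- ===== PORT B =====
def offsets_alt (conf : List Int) : List (Int × List Int) :=
  let stream := (PySem.List.enumerate conf).flatMap (fun iv => [iv.1 - iv.2, iv.1 + iv.2])
  ((PySem.List.dedup stream).foldl
      (fun d k => d.insert k
        (((PySem.List.enumerate conf).filter
            (fun iv => iv.1 - iv.2 == k || iv.1 + iv.2 == k)).map Prod.fst))
      PySem.Dict.empty).items

-- ===== PRECONDITION & SPEC =====
def Spec_offsets (conf : List Int) (out : List (Int × List Int)) : Prop := out = offsets_alt conf
instance (conf : List Int) (out : List (Int × List Int)) : Decidable (Spec_offsets conf out) := by unfold Spec_offsets; infer_instance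

-- ===== CLAIM (what is proved, stated in full; the proofs are below) =====
def Claim_equal_offsets : Prop := ∀ (conf : List Int), Dom_offsets conf → Spec_offsets conf (offsets conf)

-- ===== LEMMAS AND PROOFS =====

-- the flat stream of diagonal offsets, and the raw (duplicate-keeping) group A builds
def kstream (l : List (Int × Int)) : List Int :=
  l.flatMap (fun jv => [jv.1 - jv.2, jv.1 + jv.2])

def blockK (k : Int) (jv : Int × Int) : List Int :=
  (if jv.1 - jv.2 = k then [jv.1] else []) ++ (if jv.1 + jv.2 = k then [jv.1] else [])

def raw (l : List (Int × Int)) (k : Int) : List Int := l.flatMap (blockK k)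

def stepA (d : PySem.Dict Int (List Int)) (k i : Int) : PySem.Dict Int (List Int) :=
  d.modify k [] (· ++ [i])

lemma mem_blockK (x k : Int) (jv : Int × Int) :
    x ∈ blockK k jv ↔ (jv.1 - jv.2 = k ∨ jv.1 + jv.2 = k) ∧ x = jv.1 := by
  unfold blockK; split_ifs <;> simp <;> tauto

lemma raw_eq_nil_of_not_mem (l : List (Int × Int)) (k : Int) (h : k ∉ kstream l) :
    raw l k = [] := by
  simp only [kstream, List.mem_flatMap, not_exists] at h
  simp only [raw, List.flatMap_eq_nil_iff]
  intro jv hjv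
  have := h jv
  unfold blockK
  split_ifs with h1 h2 h2 <;> try rfl
  all_goals exfalso; exact this ⟨hjv, by simp [h1, h2]⟩

lemma find?_itemsOf (K : List Int) (f : Int → List Int) (a : Int) :
    (K.map (fun k => (k, f k))).find? (fun p => p.1 == a)
      = if a ∈ K then some (a, f a) else none := by
  induction K with
  | nil => simp
  | cons k K ih =>
    by_cases hk : k = a
    · subst hk; simp
    · simp only [List.map_cons, List.find?_cons]
      rw [show ((k, f k).1 == a) = false by simp [hk], ih]
      simp [show ¬ a = k from fun h => hk h.symm]

lemma contains_itemsOf (K : List Int) (f : Int → List Int) (a : Int) :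
    (PySem.Dict.mk (K.map (fun k => (k, f k)))).contains a = decide (a ∈ K) := by
  show (K.map (fun k => (k, f k))).any (fun p => p.1 == a) = _
  rw [List.any_map]
  induction K with
  | nil => simp
  | cons k K ih =>
    by_cases hk : k = a
    · simp [hk]
    · simp [hk, ih, show ¬ a = k from fun h => hk h.symm]

lemma items_insert_pos (d : PySem.Dict Int (List Int)) (k : Int) (v : List Int)
    (h : d.contains k = true) :
    (d.insert k v).items = d.items.map (fun p => if p.1 == k then (k, v) else p) := by
  unfold PySem.Dict.insert; rw [if_pos h]

lemma items_insert_neg (d : PySem.Dict Int (List Int)) (k : Int) (v : List Int)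
    (h : d.contains k = false) :
    (d.insert k v).items = d.items ++ [(k, v)] := by
  unfold PySem.Dict.insert; rw [if_neg (by simp [h])]

lemma stepA_itemsOf (K : List Int) (f : Int → List Int) (a j : Int)
    (hfa : a ∉ K → f a = []) :
    (stepA (PySem.Dict.mk (K.map (fun k => (k, f k)))) a j).items
      = (PySem.Set.add K a).map (fun k => (k, if k = a then f k ++ [j] else f k)) := by
  have hget : (PySem.Dict.mk (K.map (fun k => (k, f k)))).getD a []
      = if a ∈ K then f a else [] := by
    simp only [PySem.Dict.getD, PySem.Dict.get?]
    rw [find?_itemsOf]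
    split_ifs <;> rfl
  by_cases ha : a ∈ K
  · have hcon : (PySem.Dict.mk (K.map (fun k => (k, f k)))).contains a = true := by
      rw [contains_itemsOf]; simpa using ha
    rw [stepA, PySem.Dict.modify, hget, if_pos ha,
      items_insert_pos _ a _ hcon,
      show (PySem.Dict.mk (K.map (fun k => (k, f k)))).items
        = K.map (fun k => (k, f k)) from rfl,
      show (PySem.Set.add K a) = K by simp [PySem.Set.add, PySem.Set.contains, ha],
      List.map_map]
    apply List.map_congr_left
    intro k _
    by_cases hk : k = a
    · subst hk; simp
    · simp [hk]
  · have hcon : (PySem.Dict.mk (K.map (fun k => (k, f k)))).contains a = false := by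
      rw [contains_itemsOf]; simpa using ha
    rw [stepA, PySem.Dict.modify, hget, if_neg ha,
      items_insert_neg _ a _ hcon,
      show (PySem.Dict.mk (K.map (fun k => (k, f k)))).items
        = K.map (fun k => (k, f k)) from rfl,
      show (PySem.Set.add K a) = K ++ [a] by
        simp [PySem.Set.add, PySem.Set.contains, ha],
      List.map_append]
    congr 1
    · apply List.map_congr_left
      intro k hk
      have : k ≠ a := fun h => ha (h ▸ hk)
      simp [this]
    · simp [hfa ha]

lemma ofList_append_pair (s : List Int) (a b : Int) :
    PySem.Set.ofList (s ++ [a, b])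
      = PySem.Set.add (PySem.Set.add (PySem.Set.ofList s) a) b := by
  rw [PySem.Set.ofList_eq_foldl, PySem.Set.ofList_eq_foldl, List.foldl_append]
  rfl

lemma foldA_items (l : List (Int × Int)) :
    (l.foldl (fun d iv => stepA (stepA d (iv.1 - iv.2) iv.1) (iv.1 + iv.2) iv.1)
        PySem.Dict.empty).items
      = (PySem.Set.ofList (kstream l)).map (fun k => (k, raw l k)) := by
  induction l using List.reverseRecOn with
  | nil => rfl
  | append_singleton l jv ih =>
    rw [List.foldl_append, List.foldl_cons, List.foldl_nil]
    set K := PySem.Set.ofList (kstream l) with hK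
    set f := raw l with hf
    have hd : l.foldl (fun d iv => stepA (stepA d (iv.1 - iv.2) iv.1) (iv.1 + iv.2) iv.1)
        PySem.Dict.empty = PySem.Dict.mk (K.map (fun k => (k, f k))) := by
      apply PySem.Dict.ext; rw [ih]
    rw [hd]
    set a := jv.1 - jv.2
    set b := jv.1 + jv.2
    set j := jv.1
    have hfa : a ∉ K → f a = [] := by
      intro h; apply raw_eq_nil_of_not_mem
      rwa [hK, PySem.Set.mem_ofList] at h
    have h1 := stepA_itemsOf K f a j hfa
    set K1 := PySem.Set.add K a
    set f1 : Int → List Int := fun k => if k = a then f k ++ [j] else f k with hf1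
    have hd1 : stepA (PySem.Dict.mk (K.map (fun k => (k, f k)))) a j
        = PySem.Dict.mk (K1.map (fun k => (k, f1 k))) := by
      apply PySem.Dict.ext; rw [h1]
    rw [hd1]
    have hf1b : b ∉ K1 → f1 b = [] := by
      intro h
      have hb : b ∉ K ∧ b ≠ a := by
        constructor
        · intro hbK; exact h (by simp [K1, PySem.Set.mem_add, hbK])
        · intro hba; exact h (by simp [K1, PySem.Set.mem_add, hba])
      have hfb : f1 b = f b := by simp [f1, hb.2]
      rw [hfb]
      apply raw_eq_nil_of_not_mem
      rw [hK, PySem.Set.mem_ofList] at hb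
      exact hb.1
    rw [stepA_itemsOf K1 f1 b j hf1b]
    have hks : kstream (l ++ [jv]) = kstream l ++ [a, b] := by
      simp [kstream, List.flatMap_append, a, b]
    rw [hks, ofList_append_pair, ← hK]
    apply List.map_congr_left
    intro k _
    have hraw : raw (l ++ [jv]) k = f k ++ blockK k jv := by
      simp [raw, hf, List.flatMap_append]
    rw [hraw]
    unfold blockK
    by_cases hka : k = a <;> by_cases hkb : k = b <;>
      simp [f1, hka, hkb, a, b, j] <;> simp_all [a, b, j] <;> omega

lemma pairwise_lt_fst_filter_map (l : List (Int × Int)) (p : Int × Int → Bool)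
    (h : l.Pairwise (fun q r => q.1 < r.1)) :
    ((l.filter p).map Prod.fst).Pairwise (· < ·) := by
  have h1 : (l.filter p).Pairwise (fun q r => q.1 < r.1) := h.filter p
  exact h1.map _ (fun _ _ h => h)

lemma per_key (l : List (Int × Int)) (k : Int)
    (h : l.Pairwise (fun q r => q.1 < r.1)) :
    PySem.List.sorted (PySem.Set.ofList (raw l k)) id
      = (l.filter (fun iv => iv.1 - iv.2 == k || iv.1 + iv.2 == k)).map Prod.fst := by
  have hpw := pairwise_lt_fst_filter_map l (fun iv => iv.1 - iv.2 == k || iv.1 + iv.2 == k) h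
  apply PySem.List.sorted_eq_of_perm_of_pairwise_lt
  · refine (List.perm_ext_iff_of_nodup (hpw.imp (fun hlt => ne_of_lt hlt))
      (PySem.Set.nodup_ofList _)).mpr ?_
    intro x
    rw [PySem.Set.mem_ofList]
    simp only [raw, List.mem_flatMap, mem_blockK, List.mem_map, List.mem_filter,
      Bool.or_eq_true, beq_iff_eq]
    constructor
    · rintro ⟨a, ⟨ha, hc⟩, hx⟩; exact ⟨a, ha, hc, hx.symm⟩
    · rintro ⟨a, ha, hc, hx⟩; exact ⟨a, ⟨ha, hc⟩, hx.symm⟩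
  · simpa using hpw

lemma enumerate_map {α β : Type} (f : α → β) (l : List α) (s : Int) :
    PySem.List.enumerate (l.map f) s = (PySem.List.enumerate l s).map (fun p => (p.1, f p.2)) := by
  induction l generalizing s with
  | nil => rfl
  | cons x t ih => simp [PySem.List.enumerate, ih]

lemma enumerate_enumerate {α : Type} (l : List α) (s : Int) :
    PySem.List.enumerate (PySem.List.enumerate l s) s
      = (PySem.List.enumerate l s).map (fun p => (p.1, p)) := by
  induction l generalizing s with
  | nil => rfl
  | cons x t ih => simp [PySem.List.enumerate, ih]

theorem offsets_eq (conf : List Int) : offsets conf = offsets_alt conf := by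
  have hA : offsets conf
      = (((PySem.List.enumerate conf).foldl
            (fun d iv => stepA (stepA d (iv.1 - iv.2) iv.1) (iv.1 + iv.2) iv.1)
            PySem.Dict.empty).items.foldl
          (fun d kv => d.insert kv.1 (PySem.List.sorted (PySem.Set.ofList kv.2) id))
          PySem.Dict.empty).items := by
    simp only [offsets]
    rw [enumerate_map, enumerate_enumerate, List.foldl_map, List.foldl_map]
    rfl
  have hB : offsets_alt conf
      = ((PySem.List.dedup (kstream (PySem.List.enumerate conf))).foldl
          (fun d k => d.insert k
            (((PySem.List.enumerate conf).filter
                (fun iv => iv.1 - iv.2 == k || iv.1 + iv.2 == k)).map Prod.fst))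
          PySem.Dict.empty).items := rfl
  rw [hA, hB]
  have hfold := foldA_items (PySem.List.enumerate conf)
  rw [← PySem.List.dedup_eq_ofList] at hfold
  set S := PySem.List.dedup (kstream (PySem.List.enumerate conf)) with hS
  have hndS : S.Nodup := PySem.List.nodup_dedup _
  rw [hfold]
  rw [PySem.Dict.items_foldl_insert_fresh (S.map (fun k => (k, raw (PySem.List.enumerate conf) k)))
      Prod.fst (fun kv => PySem.List.sorted (PySem.Set.ofList kv.2) id) PySem.Dict.empty
      (fun a _ => by simp [PySem.Dict.contains, PySem.Dict.empty])
      (by simpa [Function.comp_def] using hndS)]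
  rw [PySem.Dict.items_foldl_insert_fresh S (fun x => x)
      (fun k => ((PySem.List.enumerate conf).filter
        (fun iv => iv.1 - iv.2 == k || iv.1 + iv.2 == k)).map Prod.fst) PySem.Dict.empty
      (fun a _ => by simp [PySem.Dict.contains, PySem.Dict.empty])
      (by simpa using hndS)]
  rw [show (PySem.Dict.empty : PySem.Dict Int (List Int)).items = [] from rfl,
    List.nil_append, List.nil_append, List.map_map]
  apply List.map_congr_left
  intro k _
  simp only [Function.comp_apply]
  rw [per_key (PySem.List.enumerate conf) k (PySem.List.pairwise_lt_enumerate conf 0)]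

-- ===== VERDICT (by name: the statement is the Claim_ definition above) =====
theorem offsets_spec : Claim_equal_offsets := by
  intro conf _
  unfold Spec_offsets
  exact offsets_eq conf
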